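-- pv_equiv track=rewrite | github.com/jjs88/CS50_Python | Week5/problem_set5/plates.py | number_not_in_middle
-- ===== SOURCE A (Python) =====
-- def number_not_in_middle(plate:str):
--     numbers = ['0','1','2','3','4','5','6','7','8','9']
--     result:bool = True
--     rest_of_plate:str = ""
--
--     for p in range(len(plate)):
--         if p + 1 != len(plate) and plate[p] in numbers: # if number found and not the last one
--             if plate[p+1] not in numbers: #check if next char not a number
--                 result = False
--                 break
--
--     return result
-- ===== SOURCE B (Python) =====
-- def number_not_in_middle(plate: str):
--     digits = "0123456789"
--     i = next((k for k, c in enumerate(plate) if c in digits), None)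
--     if i is None:
--         return True
--     return all(c in digits for c in plate[i:])
-- ===== Notes on version B (the rewrite author's own statement) =====
-- stated objective: simpler
-- what changed: Replaces A's index loop over adjacent pairs with a two-phase check: locate the first digit, then verify the whole suffix from there is digits.
import Mathlib
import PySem

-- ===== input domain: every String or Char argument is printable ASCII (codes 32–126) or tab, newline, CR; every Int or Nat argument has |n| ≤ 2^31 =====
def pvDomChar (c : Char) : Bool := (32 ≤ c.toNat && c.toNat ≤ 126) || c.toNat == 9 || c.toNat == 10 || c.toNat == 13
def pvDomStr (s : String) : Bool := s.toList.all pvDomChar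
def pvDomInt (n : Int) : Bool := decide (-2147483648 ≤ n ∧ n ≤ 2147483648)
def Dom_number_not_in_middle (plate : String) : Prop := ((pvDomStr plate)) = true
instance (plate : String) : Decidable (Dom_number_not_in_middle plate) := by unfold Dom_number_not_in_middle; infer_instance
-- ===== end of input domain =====

-- B replaces A's adjacent-pair index loop by a simpler two-phase check (find first digit, then verify the suffix is all digits); equal return values on all strings.


set_option maxRecDepth 4000

-- ===== PORT A =====
-- 'plate[p] in numbers' membership test
def pvIsNum (c : Char) : Bool := c ∈ ['0','1','2','3','4','5','6','7','8','9']

-- the for-loop of A: index p runs over range(len(plate)); 'break' returns the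
-- just-set result False, otherwise the loop continues carrying 'result'.
def pvALoop (cs : List Char) (p : Nat) (result : Bool) : Bool :=
  if h : p < cs.length then
    if p + 1 ≠ cs.length ∧ pvIsNum cs[p] then
      if ¬ pvIsNum (cs[p+1]!) then false
      else pvALoop cs (p+1) result
    else pvALoop cs (p+1) result
  else result
termination_by cs.length - p

def number_not_in_middle (plate : String) : Bool :=
  pvALoop plate.toList 0 true

-- ===== PORT B =====
def number_not_in_middle_alt (plate : String) : Bool :=
  let cs := plate.toList
  match cs.findIdx? pvIsNum with
  | none => true
  | some i => (cs.drop i).all pvIsNum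

-- ===== PRECONDITION & SPEC =====
def Spec_number_not_in_middle (plate : String) (out : Bool) : Prop := out = number_not_in_middle_alt plate
instance (plate : String) (out : Bool) : Decidable (Spec_number_not_in_middle plate out) := by unfold Spec_number_not_in_middle; infer_instance

-- ===== CLAIM (what is proved, stated in full; the proofs are below) =====
def Claim_equal_number_not_in_middle : Prop := ∀ (plate : String), Dom_number_not_in_middle plate → Spec_number_not_in_middle plate (number_not_in_middle plate)

-- ===== LEMMAS AND PROOFS =====

-- adjacent-pair check, structurally on the list (proof-side reformulation of A's loop)
def pvAdjOK : List Char → Bool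
  | [] => true
  | [_] => true
  | a :: b :: t => if pvIsNum a ∧ ¬ pvIsNum b then false else pvAdjOK (b :: t)

theorem pvAdjOK_cons_cons (a b : Char) (t : List Char) :
    pvAdjOK (a :: b :: t) = if pvIsNum a ∧ ¬ pvIsNum b then false else pvAdjOK (b :: t) := rfl

theorem pvALoop_eq_adjOK_aux (cs : List Char) (n : Nat) :
    ∀ p, cs.length - p ≤ n → pvALoop cs p true = pvAdjOK (cs.drop p) := by
  induction n with
  | zero =>
    intro p hp
    have h : ¬ p < cs.length := by omega
    unfold pvALoop
    simp only [h, dif_neg, not_false_eq_true]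
    rw [List.drop_eq_nil_of_le (le_of_not_gt h)]; rfl
  | succ n ih =>
    intro p hp
    unfold pvALoop
    by_cases h : p < cs.length
    · simp only [h, dif_pos]
      have hdrop : cs.drop p = cs[p] :: cs.drop (p+1) := List.drop_eq_getElem_cons h
      have ihp : pvALoop cs (p+1) true = pvAdjOK (cs.drop (p+1)) := ih (p+1) (by omega)
      by_cases hc : p + 1 ≠ cs.length ∧ pvIsNum cs[p] = true
      · rw [if_pos hc]
        have h1 : p + 1 < cs.length := lt_of_le_of_ne h hc.1
        have hdrop2 : cs.drop (p+1) = cs[p+1] :: cs.drop (p+2) := List.drop_eq_getElem_cons h1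
        have hbang : cs[p+1]! = cs[p+1] := getElem!_pos cs (p+1) h1
        rw [hbang, hdrop, hdrop2, pvAdjOK_cons_cons]
        by_cases hb : pvIsNum cs[p+1] = true
        · rw [if_neg (by simp [hb]), if_neg (by simp [hb]), ihp, hdrop2]
        · simp only [Bool.not_eq_true] at hb
          rw [if_pos (by simp [hb]), if_pos ⟨hc.2, by simp [hb]⟩]
      · rw [if_neg hc, ihp, hdrop]
        rcases Decidable.not_and_iff_or_not.mp hc with h1 | h2
        · have hlen : cs.length ≤ p + 1 := by omega
          rw [List.drop_eq_nil_of_le hlen]; rfl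
        · cases hx : cs.drop (p+1) with
          | nil => rfl
          | cons b t =>
            simp only [Bool.not_eq_true] at h2
            rw [pvAdjOK_cons_cons, if_neg (by simp [h2])]
    · simp only [h, dif_neg, not_false_eq_true]
      rw [List.drop_eq_nil_of_le (le_of_not_gt h)]; rfl

theorem pvALoop_eq_adjOK (cs : List Char) (p : Nat) :
    pvALoop cs p true = pvAdjOK (cs.drop p) :=
  pvALoop_eq_adjOK_aux cs cs.length p (by omega)

theorem pvAdjOK_all_of_head (a : Char) (t : List Char) (ha : pvIsNum a = true) :
    pvAdjOK (a :: t) = (a :: t).all pvIsNum := by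
  induction t generalizing a with
  | nil => simp [pvAdjOK, ha]
  | cons b u ih =>
    rw [pvAdjOK_cons_cons]
    by_cases hb : pvIsNum b = true
    · rw [if_neg (by simp [hb]), ih b hb]
      simp [ha]
    · simp only [Bool.not_eq_true] at hb
      rw [if_pos ⟨ha, by simp [hb]⟩]
      simp [hb]

theorem pvAdjOK_eq_alt (cs : List Char) :
    pvAdjOK cs = (match cs.findIdx? pvIsNum with
      | none => true
      | some i => (cs.drop i).all pvIsNum) := by
  induction cs with
  | nil => rfl
  | cons a t ih =>
    rw [List.findIdx?_cons]
    by_cases ha : pvIsNum a = true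
    · simp only [ha, if_pos, List.drop_zero]
      exact pvAdjOK_all_of_head a t ha
    · simp only [Bool.not_eq_true] at ha
      simp only [ha, Bool.false_eq_true, if_neg, not_false_eq_true]
      have hA : pvAdjOK (a :: t) = pvAdjOK t := by
        cases t with
        | nil => rfl
        | cons b u => rw [pvAdjOK_cons_cons, if_neg (by simp [ha])]
      rw [hA, ih]
      cases hf : t.findIdx? pvIsNum with
      | none => simp
      | some i => simp [Option.map_some, List.drop_succ_cons]

-- ===== VERDICT (by name: the statement is the Claim_ definition above) =====
theorem number_not_in_middle_spec : Claim_equal_number_not_in_middle := by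
  intro plate _
  unfold Spec_number_not_in_middle number_not_in_middle number_not_in_middle_alt
  rw [pvALoop_eq_adjOK, List.drop_zero, pvAdjOK_eq_alt]
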